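-- pv_equiv track=rewrite | github.com/fras/flexlm_analysis | flexlm_analysis.py | do_gnuplot_stats
-- ===== SOURCE A (Python) =====
-- def init_use_upon_state(state):
--     """Inits use variable upon the first state we
--     encounter. We normally should only encounter
--     a OUT state but it might not be the case in
--     real life so a IN state fixes use at 0.
--     """
--
--     use = 0
--     if state.lower() == 'out':
--         use = 1
--     elif state.lower == 'in':
--         use = 0
--
--     return use
--
-- def update_use_value_upon_state(state, use):
--     """updates use variable upon state content:
--     OUT adds a usage an IN removes a usage.
--     """
--
--     if state.lower() == 'out':
--         use = use + 1
--     elif state.lower() == 'in':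
--         use = use - 1
--
--     return use
--
-- def deduplicate(stats_dedup, state, module, user, machine):
--     """Deduplicate licenses checked out by the same user on the same
--     machine."""
--
--     module_user_machine = module + ":" + user + "@" + machine
--     if state.lower() == "out":
--         if module_user_machine in stats_dedup:
--             return True
--         else:
--             stats_dedup.add(module_user_machine)
--     elif state.lower() == "in":
--         if module_user_machine in stats_dedup:
--             stats_dedup.remove(module_user_machine)
--         else:
--             return True
--
--     return False
--
-- def do_gnuplot_stats(result_list):
--     """Here we do some gnuplot style stats in order to create a report of the
--     evolution of the use of the modules.
--
--     event_list contains the date, time and number of used licenses in reverse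
--     chronological order.
--     """
--
--     module_list = []
--     stats = dict()
--     stats_dedup = set()
--
--     for data in result_list:
--         (date, time, state, module, user, machine) = data
--
--         if deduplicate(stats_dedup, state, module, user, machine):
--             continue
--
--         if module not in module_list:
--             module_list.append(module)
--             stats[module] = []   # Creating an empty list of tuples for this new module.
--
--         event_list = stats[module]
--
--         if event_list == []:
--             use = init_use_upon_state(state)
--         else:
--             (some_date, some_time, use) = event_list[0]  # retrieving the last 'use' value to update it
--             use = update_use_value_upon_state(state, use)
--
--         event_list.insert(0, (date, time, use))  # Prepending to the list
--         stats[module] = event_list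
--
--     return (stats, module_list)
-- ===== SOURCE B (Python) =====
-- def do_gnuplot_stats(result_list):
--     """Two-pass rewrite: first collect surviving events per module (shared
--     dedup set, lowercased state), then accumulate usage per module and
--     reverse so the newest event ends up first, as in the original."""
--
--     module_list = []
--     groups = {}
--     dedup = set()
--
--     for (date, time, state, module, user, machine) in result_list:
--         s = state.lower()
--         key = module + ":" + user + "@" + machine
--         if s == "out":
--             if key in dedup:
--                 continue
--             dedup.add(key)
--         elif s == "in":
--             if key not in dedup:
--                 continue
--             dedup.discard(key)
--         if module not in groups:
--             module_list.append(module)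
--             groups[module] = []
--         groups[module].append((date, time, s))
--
--     stats = {}
--     for module in module_list:
--         events = []
--         use = 0
--         first = True
--         for (date, time, s) in groups[module]:
--             if first:
--                 use = 1 if s == "out" else 0
--                 first = False
--             elif s == "out":
--                 use += 1
--             elif s == "in":
--                 use -= 1
--             events.append((date, time, use))
--         events.reverse()
--         stats[module] = events
--
--     return (stats, module_list)
-- ===== Notes on version B (the rewrite author's own statement) =====
-- stated objective: alternative
-- what changed: B splits A's single stateful loop into two passes: one pass deduplicates and groups surviving events per module (recording first-appearance order), and a second pass folds the usage counter forward over each module's events and reverses once, instead of re-reading the stored list head and prepending at every event.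
import Mathlib
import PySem

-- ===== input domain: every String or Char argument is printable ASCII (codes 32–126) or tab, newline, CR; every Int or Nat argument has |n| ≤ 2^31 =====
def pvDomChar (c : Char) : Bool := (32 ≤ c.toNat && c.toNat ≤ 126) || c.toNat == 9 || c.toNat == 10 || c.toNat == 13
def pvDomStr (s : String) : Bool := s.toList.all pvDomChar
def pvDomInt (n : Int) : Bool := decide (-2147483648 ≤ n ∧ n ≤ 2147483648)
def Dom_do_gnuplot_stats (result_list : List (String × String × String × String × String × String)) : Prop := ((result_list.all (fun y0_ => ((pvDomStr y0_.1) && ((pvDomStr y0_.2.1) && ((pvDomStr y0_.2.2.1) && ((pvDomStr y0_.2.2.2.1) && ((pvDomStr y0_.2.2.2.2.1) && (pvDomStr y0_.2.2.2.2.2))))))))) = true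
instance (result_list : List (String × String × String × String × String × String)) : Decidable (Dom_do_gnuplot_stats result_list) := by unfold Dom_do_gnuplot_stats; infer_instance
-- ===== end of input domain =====

-- B separates collection from accumulation: one pass groups surviving events per
-- module, a second pass folds the usage counter forward and reverses once,
-- instead of re-reading the stored list head at every event (objective: alternative decomposition).

-- ===== PORT A =====

def init_use_upon_state (state : String) : Int :=
  -- Python's `elif state.lower == 'in'` compares a bound method to a string (never
  -- true), and its body sets use to 0 anyway; either way use stays 0 here.
  if PySem.Str.lower state = "out" then 1 else 0

def update_use_value_upon_state (state : String) (use : Int) : Int :=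
  if PySem.Str.lower state = "out" then use + 1
  else if PySem.Str.lower state = "in" then use - 1
  else use

def deduplicate (stats_dedup : PySem.Set String) (state md user machine : String) :
    Bool × PySem.Set String :=
  let module_user_machine := md ++ ":" ++ user ++ "@" ++ machine
  if PySem.Str.lower state = "out" then
    if module_user_machine ∈ stats_dedup then (true, stats_dedup)
    else (false, PySem.Set.add stats_dedup module_user_machine)
  else if PySem.Str.lower state = "in" then
    -- Python's .remove here never raises: it runs only when the key is a member
    if module_user_machine ∈ stats_dedup then (false, PySem.Set.discard stats_dedup module_user_machine)
    else (true, stats_dedup)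
  else (false, stats_dedup)

def aStep (acc : List String × PySem.Dict String (List (String × String × Int)) × PySem.Set String)
    (data : String × String × String × String × String × String) :
    List String × PySem.Dict String (List (String × String × Int)) × PySem.Set String :=
  match data, acc with
  | (date, time, state, md, user, machine), (module_list, stats, stats_dedup) =>
    match deduplicate stats_dedup state md user machine with
    | (dup, stats_dedup) =>
      if dup then (module_list, stats, stats_dedup)
      else
        let (module_list, stats) :=
          if md ∈ module_list then (module_list, stats)
          else (module_list ++ [md], stats.insert md [])
        let event_list := stats.getD md []
        let use :=
          match event_list with
          | [] => init_use_upon_state state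
          | (_, _, u) :: _ => update_use_value_upon_state state u
        (module_list, stats.insert md ((date, time, use) :: event_list), stats_dedup)

def do_gnuplot_stats (result_list : List (String × String × String × String × String × String)) : (List (String × List (String × String × Int))) × List String :=
  match result_list.foldl aStep ([], PySem.Dict.empty, PySem.Set.empty) with
  | (module_list, stats, _) => (stats.items, module_list)

-- ===== PORT B =====

-- shared tail of the three surviving branches of B's first-pass loop body
def bRecord (groups : PySem.Dict String (List (String × String × String)))
    (module_list : List String) (dedup : PySem.Set String)
    (date time s md : String) :
    PySem.Dict String (List (String × String × String)) × List String × PySem.Set String :=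
  let (groups, module_list) :=
    if groups.contains md then (groups, module_list)
    else (groups.insert md [], module_list ++ [md])
  (groups.insert md (groups.getD md [] ++ [(date, time, s)]), module_list, dedup)

def bCollect (acc : PySem.Dict String (List (String × String × String)) × List String × PySem.Set String)
    (data : String × String × String × String × String × String) :
    PySem.Dict String (List (String × String × String)) × List String × PySem.Set String :=
  match data, acc with
  | (date, time, state, md, user, machine), (groups, module_list, dedup) =>
    let s := PySem.Str.lower state
    let key := md ++ ":" ++ user ++ "@" ++ machine
    if s = "out" then
      if key ∈ dedup then (groups, module_list, dedup)
      else bRecord groups module_list (PySem.Set.add dedup key) date time s md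
    else if s = "in" then
      if key ∈ dedup then bRecord groups module_list (PySem.Set.discard dedup key) date time s md
      else (groups, module_list, dedup)
    else bRecord groups module_list dedup date time s md

def bUseStep (acc : List (String × String × Int) × Int × Bool) (ev : String × String × String) :
    List (String × String × Int) × Int × Bool :=
  match acc, ev with
  | (events, use, first), (date, time, s) =>
    let use :=
      if first then (if s = "out" then 1 else 0)
      else if s = "out" then use + 1
      else if s = "in" then use - 1
      else use
    (events ++ [(date, time, use)], use, false)

def do_gnuplot_stats_alt (result_list : List (String × String × String × String × String × String)) : (List (String × List (String × String × Int))) × List String :=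
  match result_list.foldl bCollect (PySem.Dict.empty, [], PySem.Set.empty) with
  | (groups, module_list, _) =>
    let stats := module_list.foldl
      (fun stats md =>
        stats.insert md (((groups.getD md []).foldl bUseStep ([], 0, true)).1.reverse))
      PySem.Dict.empty
    (stats.items, module_list)

-- ===== PRECONDITION & SPEC =====
def Spec_do_gnuplot_stats (result_list : List (String × String × String × String × String × String)) (out : (List (String × List (String × String × Int))) × List String) : Prop := out = do_gnuplot_stats_alt result_list
instance (result_list : List (String × String × String × String × String × String)) (out : (List (String × List (String × String × Int))) × List String) : Decidable (Spec_do_gnuplot_stats result_list out) := by unfold Spec_do_gnuplot_stats; infer_instance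

-- ===== CLAIM (what is proved, stated in full; the proofs are below) =====
def Claim_equal_do_gnuplot_stats : Prop := ∀ (result_list : List (String × String × String × String × String × String)), Dom_do_gnuplot_stats result_list → Spec_do_gnuplot_stats result_list (do_gnuplot_stats result_list)

-- ===== LEMMAS AND PROOFS =====

-- B's per-module value: accumulated usage list, newest event first
def pvVal (groups : PySem.Dict String (List (String × String × String))) (m : String) :
    List (String × String × Int) :=
  ((groups.getD m []).foldl bUseStep ([], 0, true)).1.reverse

-- A's record action (the non-deduplicated tail of aStep), named for the proofs
def pvARecord (module_list : List String)
    (stats : PySem.Dict String (List (String × String × Int)))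
    (date time state md : String) :
    List String × PySem.Dict String (List (String × String × Int)) :=
  let (module_list, stats) :=
    if md ∈ module_list then (module_list, stats)
    else (module_list ++ [md], stats.insert md [])
  let event_list := stats.getD md []
  let use :=
    match event_list with
    | [] => init_use_upon_state state
    | (_, _, u) :: _ => update_use_value_upon_state state u
  (module_list, stats.insert md ((date, time, use) :: event_list))

-- the simulation invariant between A's loop state and B's first-pass state
def pvInv (module_list : List String)
    (stats : PySem.Dict String (List (String × String × Int)))
    (groups : PySem.Dict String (List (String × String × String))) : Prop :=
  stats.items = module_list.map (fun m => (m, pvVal groups m)) ∧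
  groups.keys = module_list ∧ module_list.Nodup

-- shape invariant of B's accumulator: the flag marks emptiness, and the
-- accumulated use equals the use stored in the last emitted tuple
def pvGood (st : List (String × String × Int) × Int × Bool) : Prop :=
  (st.2.2 = true ∧ st.1 = []) ∨
  (st.2.2 = false ∧ ∃ pre d t, st.1 = pre ++ [(d, t, st.2.1)])

theorem pvGood_step (st : List (String × String × Int) × Int × Bool)
    (ev : String × String × String) : pvGood (bUseStep st ev) := by
  obtain ⟨events, use, first⟩ := st
  obtain ⟨d, t, s⟩ := ev
  exact Or.inr ⟨rfl, events, d, t, rfl⟩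

theorem pvGood_run (evs : List (String × String × String))
    (st : List (String × String × Int) × Int × Bool) (h : pvGood st) :
    pvGood (evs.foldl bUseStep st) := by
  induction evs generalizing st with
  | nil => exact h
  | cons e es ih => exact ih _ (pvGood_step st e)

-- appending one event to a module's event group prepends one accumulated tuple,
-- whose use is computed exactly the way A computes it from the stored head
theorem pvVal_snoc (evs : List (String × String × String)) (date time state : String) :
    (bUseStep (evs.foldl bUseStep ([], 0, true)) (date, time, PySem.Str.lower state)).1.reverse =
      (date, time,
        (match (evs.foldl bUseStep ([], 0, true)).1.reverse with
         | [] => init_use_upon_state state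
         | (_, _, u) :: _ => update_use_value_upon_state state u))
        :: (evs.foldl bUseStep ([], 0, true)).1.reverse := by
  rcases pvGood_run evs ([], 0, true) (Or.inl ⟨rfl, rfl⟩) with ⟨hf, he⟩ | ⟨hf, pre, d0, t0, hst⟩
  · rcases hE : evs.foldl bUseStep ([], 0, true) with ⟨ev0, u0, f0⟩
    rw [hE] at hf he
    simp only at hf he
    subst hf he
    simp [bUseStep, init_use_upon_state]
  · rcases hE : evs.foldl bUseStep ([], 0, true) with ⟨ev0, u0, f0⟩
    rw [hE] at hf hst
    simp only at hf hst
    subst hf hst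
    simp [bUseStep, update_use_value_upon_state]

-- one surviving (non-deduplicated) event preserves the simulation invariant
theorem pvInv_record (module_list : List String)
    (stats : PySem.Dict String (List (String × String × Int)))
    (groups : PySem.Dict String (List (String × String × String)))
    (dedup : PySem.Set String) (date time state md : String)
    (h : pvInv module_list stats groups) :
    (bRecord groups module_list dedup date time (PySem.Str.lower state) md).2.1 =
        (pvARecord module_list stats date time state md).1 ∧
    (bRecord groups module_list dedup date time (PySem.Str.lower state) md).2.2 = dedup ∧
    pvInv (pvARecord module_list stats date time state md).1
      (pvARecord module_list stats date time state md).2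
      (bRecord groups module_list dedup date time (PySem.Str.lower state) md).1 := by
  obtain ⟨hitems, hkeys, hnd⟩ := h
  have hskeys : stats.keys = module_list := by
    simp [PySem.Dict.keys, hitems, Function.comp_def]
  have hsnd : stats.keys.Nodup := hskeys ▸ hnd
  by_cases hm : md ∈ module_list
  · -- known module: both sides overwrite in place
    have hgc : groups.contains md = true := by
      simp [PySem.Dict.contains_eq_decide_mem_keys, hkeys, hm]
    have hsc : stats.contains md = true := by
      simp [PySem.Dict.contains_eq_decide_mem_keys, hskeys, hm]
    have hel : stats.getD md [] = pvVal groups md :=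
      PySem.Dict.getD_of_mem_items stats (by rw [hitems]; exact List.mem_map_of_mem hm) hsnd []
    have ha : pvARecord module_list stats date time state md =
        (module_list, stats.insert md ((date, time,
          (match stats.getD md [] with
           | [] => init_use_upon_state state
           | (_, _, u) :: _ => update_use_value_upon_state state u)) :: stats.getD md [])) := by
      simp [pvARecord, hm]
    have hb : bRecord groups module_list dedup date time (PySem.Str.lower state) md =
        (groups.insert md (groups.getD md [] ++ [(date, time, PySem.Str.lower state)]),
         module_list, dedup) := by
      simp [bRecord, hgc]
    simp only [ha, hb]
    unfold pvInv
    refine ⟨trivial, trivial, ?_, ?_, hnd⟩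
    · rw [PySem.Dict.items_insert_of_contains stats _ hsc, hitems, List.map_map]
      refine List.map_congr_left (fun m hmem => ?_)
      by_cases heq : m = md
      · subst heq
        simp only [Function.comp, beq_self_eq_true, if_pos]
        rw [hel]
        simp [pvVal, PySem.Dict.getD_insert_self, pvVal_snoc]
      · simp only [Function.comp]
        rw [if_neg (by simpa using heq)]
        rw [show pvVal (groups.insert md (groups.getD md [] ++ [(date, time, PySem.Str.lower state)])) m
              = pvVal groups m from by
            simp [pvVal, PySem.Dict.getD_insert_of_ne _ _ _ heq]]
    · rw [PySem.Dict.keys_insert_of_contains groups _ hgc, hkeys]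
  · -- fresh module: both sides append it
    have hgc : groups.contains md = false := by
      simp [PySem.Dict.contains_eq_decide_mem_keys, hkeys, hm]
    have hsc : stats.contains md = false := by
      simp [PySem.Dict.contains_eq_decide_mem_keys, hskeys, hm]
    have ha : pvARecord module_list stats date time state md =
        (module_list ++ [md],
         (stats.insert md []).insert md [(date, time, init_use_upon_state state)]) := by
      simp [pvARecord, hm, PySem.Dict.getD_insert_self]
    have hb : bRecord groups module_list dedup date time (PySem.Str.lower state) md =
        (groups.insert md [(date, time, PySem.Str.lower state)],
         module_list ++ [md], dedup) := by
      simp [bRecord, hgc, PySem.Dict.getD_insert_self, PySem.Dict.insert_insert_self]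
    simp only [ha, hb]
    unfold pvInv
    refine ⟨trivial, trivial, ?_, ?_, ?_⟩
    · rw [PySem.Dict.insert_insert_self,
          PySem.Dict.items_insert_of_not_contains stats _ hsc, hitems, List.map_append]
      congr 1
      · refine List.map_congr_left (fun m hmem => ?_)
        have hne : m ≠ md := fun he => hm (he ▸ hmem)
        rw [show pvVal (groups.insert md [(date, time, PySem.Str.lower state)]) m
              = pvVal groups m from by
            simp [pvVal, PySem.Dict.getD_insert_of_ne _ _ _ hne]]
      · simp [pvVal, PySem.Dict.getD_insert_self, bUseStep, init_use_upon_state]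
    · rw [PySem.Dict.keys_insert_of_not_contains groups _ hgc, hkeys]
    · exact List.Nodup.append hnd (List.nodup_singleton md)
        (by simp [List.disjoint_singleton, hm])

-- one loop iteration: A's step and B's first-pass step stay in simulation
theorem pvInv_step (module_list : List String)
    (stats : PySem.Dict String (List (String × String × Int)))
    (groups : PySem.Dict String (List (String × String × String)))
    (dedup : PySem.Set String)
    (e : String × String × String × String × String × String)
    (h : pvInv module_list stats groups) :
    (aStep (module_list, stats, dedup) e).1 = (bCollect (groups, module_list, dedup) e).2.1 ∧
    (aStep (module_list, stats, dedup) e).2.2 = (bCollect (groups, module_list, dedup) e).2.2 ∧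
    pvInv (aStep (module_list, stats, dedup) e).1 (aStep (module_list, stats, dedup) e).2.1
      (bCollect (groups, module_list, dedup) e).1 := by
  obtain ⟨date, time, state, md, user, machine⟩ := e
  have hrec := pvInv_record module_list stats groups
  by_cases hout : PySem.Str.lower state = "out"
  · by_cases hk : (md ++ ":" ++ user ++ "@" ++ machine) ∈ dedup
    · simp only [aStep, bCollect, deduplicate, hout, hk]
      simp
      exact h
    · have := hrec (PySem.Set.add dedup (md ++ ":" ++ user ++ "@" ++ machine))
        date time state md h
      simp only [aStep, bCollect, deduplicate, hout, hk] at this ⊢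
      simp only [pvARecord] at this
      simp at this ⊢
      exact ⟨this.1.symm, this.2.1.symm, this.2.2⟩
  · by_cases hin : PySem.Str.lower state = "in"
    · by_cases hk : (md ++ ":" ++ user ++ "@" ++ machine) ∈ dedup
      · have := hrec (PySem.Set.discard dedup (md ++ ":" ++ user ++ "@" ++ machine))
          date time state md h
        simp only [aStep, bCollect, deduplicate, hin, hk] at this ⊢
        simp only [pvARecord] at this
        simp at this ⊢
        exact ⟨this.1.symm, this.2.1.symm, this.2.2⟩
      · simp only [aStep, bCollect, deduplicate, hin, hk]
        simp
        exact h
    · have := hrec dedup date time state md h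
      simp only [aStep, bCollect, deduplicate, hout, hin] at this ⊢
      simp only [pvARecord] at this
      simp at this ⊢
      exact ⟨this.1.symm, this.2.1.symm, this.2.2⟩

-- the whole loop: A's fold and B's first-pass fold stay in simulation
theorem pvInv_loop (l : List (String × String × String × String × String × String))
    (module_list : List String)
    (stats : PySem.Dict String (List (String × String × Int)))
    (groups : PySem.Dict String (List (String × String × String)))
    (dedup : PySem.Set String)
    (h : pvInv module_list stats groups) :
    (l.foldl aStep (module_list, stats, dedup)).1 =
        (l.foldl bCollect (groups, module_list, dedup)).2.1 ∧
    pvInv (l.foldl aStep (module_list, stats, dedup)).1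
      (l.foldl aStep (module_list, stats, dedup)).2.1
      (l.foldl bCollect (groups, module_list, dedup)).1 := by
  induction l generalizing module_list stats groups dedup with
  | nil => exact ⟨rfl, h⟩
  | cons e es ih =>
    obtain ⟨hml, hsd, hinv⟩ := pvInv_step module_list stats groups dedup e h
    rcases haS : aStep (module_list, stats, dedup) e with ⟨ml', stats', dd'⟩
    rcases haB : bCollect (groups, module_list, dedup) e with ⟨groups', ml'', dd''⟩
    simp only [haS, haB] at hml hsd hinv
    subst hml hsd
    simpa [List.foldl_cons, haS, haB] using ih ml' stats' groups' dd' hinv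

-- ===== VERDICT (by name: the statement is the Claim_ definition above) =====
theorem do_gnuplot_stats_spec : Claim_equal_do_gnuplot_stats := by
  intro result_list _
  unfold Spec_do_gnuplot_stats do_gnuplot_stats do_gnuplot_stats_alt
  obtain ⟨hml, hitems, hkeys, hnd⟩ :=
    pvInv_loop result_list [] PySem.Dict.empty PySem.Dict.empty PySem.Set.empty
      ⟨rfl, rfl, List.nodup_nil⟩
  rcases hA : result_list.foldl aStep ([], PySem.Dict.empty, PySem.Set.empty)
    with ⟨mlA, statsA, ddA⟩
  rcases hB : result_list.foldl bCollect (PySem.Dict.empty, [], PySem.Set.empty)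
    with ⟨groupsB, mlB, ddB⟩
  simp only [hA, hB] at hml hitems hkeys hnd
  subst hml
  simp only [hitems]
  rw [PySem.Dict.items_foldl_insert_fresh mlA (fun m => m)
        (fun m => ((groupsB.getD m []).foldl bUseStep ([], 0, true)).1.reverse)
        PySem.Dict.empty (fun a _ => PySem.Dict.contains_empty a) (by simpa using hnd)]
  simp only [pvVal]
  rfl
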